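-- pv_equiv track=rewrite | github.com/puszekjuliuszek/c_files_parser | feature_spaces_tiling.py | reconstruct_arrays
-- ===== SOURCE A (Python) =====
-- def reconstruct_arrays(list_of_iterators):
--     arrays_for_read = []
--     arrays_for_write = []
--     current_pattern = ''
--     current_index = list_of_iterators[0][1]
--     for idx, iterator in enumerate(list_of_iterators):
--         array_name, dimensionality, side, it = iterator
--         if current_index == 0:
--             current_index += dimensionality
--             if list_of_iterators[idx - 1][2] == 'l':
--                 arrays_for_write.append(current_pattern)
--             else:
--                 arrays_for_read.append(current_pattern)
--             current_pattern = it
--             current_index -= 1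
--         else:
--             current_pattern += it
--             current_index -= 1
--     if list_of_iterators[-1][2] == 'l':
--         arrays_for_write.append(current_pattern)
--     else:
--         arrays_for_read.append(current_pattern)
--     return arrays_for_read, arrays_for_write
-- ===== SOURCE B (Python) =====
-- def reconstruct_arrays(list_of_iterators):
--     # Pass 1: find the index at which each new array group starts.
--     starts = []
--     counter = list_of_iterators[0][1]
--     for idx, (_, dimensionality, _, _) in enumerate(list_of_iterators):
--         if counter == 0:
--             starts.append(idx)
--             counter = dimensionality
--         counter -= 1
--     # Pass 2: slice out each group and classify it by its last element's side.
--     arrays_for_read = []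
--     arrays_for_write = []
--     begin = 0
--     for end in starts + [len(list_of_iterators)]:
--         group = list_of_iterators[begin:end]
--         if group:
--             pattern = ''.join(x[3] for x in group)
--             if group[-1][2] == 'l':
--                 arrays_for_write.append(pattern)
--             else:
--                 arrays_for_read.append(pattern)
--         begin = end
--     return arrays_for_read, arrays_for_write
-- ===== Notes on version B (the rewrite author's own statement) =====
-- stated objective: alternative
-- what changed: A interleaves counting, pattern-building and classification in one stateful loop; B separates them: a first pass computes only the group start indices from the counter, then a second pass slices each group out whole, joins its it-fields and classifies it uniformly by its own last element's side.
-- intended difference: On nonempty inputs whose first element has dimensionality 0, A flushes at index 0 and returns an extra spurious empty pattern '' classified by the LAST element's side (an accidental idx-1 == -1 negative-index wrap); B emits no empty group there, which is the intended grouping. — e.g. on reconstruct_arrays([("a", 0, "r", "i")]): A returns (["", "i"], []), B returns (["i"], [])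
import Mathlib
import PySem

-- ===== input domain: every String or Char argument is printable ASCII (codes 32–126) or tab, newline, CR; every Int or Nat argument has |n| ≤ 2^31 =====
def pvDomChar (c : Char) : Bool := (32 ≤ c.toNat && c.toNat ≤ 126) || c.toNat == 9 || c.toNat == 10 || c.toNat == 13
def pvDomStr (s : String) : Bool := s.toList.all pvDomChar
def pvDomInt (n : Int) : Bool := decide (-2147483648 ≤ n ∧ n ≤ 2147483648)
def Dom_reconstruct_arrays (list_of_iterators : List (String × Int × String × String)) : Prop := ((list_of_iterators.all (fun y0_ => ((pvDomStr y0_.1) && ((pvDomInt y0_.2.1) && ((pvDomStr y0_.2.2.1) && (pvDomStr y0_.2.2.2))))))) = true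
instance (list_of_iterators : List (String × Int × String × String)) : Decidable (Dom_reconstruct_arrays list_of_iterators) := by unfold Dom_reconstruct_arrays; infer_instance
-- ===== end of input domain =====

-- B replaces A's single stateful loop (counter + growing pattern + classification interleaved)
-- with two separate passes: first compute the group start indices from the counter, then slice
-- each group out whole and classify it by its own last element's side; objective: alternative.

-- ===== PORT A =====
-- the for-loop over enumerate(list_of_iterators): state (r, w, pat, c) = (arrays_for_read,
-- arrays_for_write, current_pattern, current_index); idx counts absolutely, L is the full list
-- (needed for list_of_iterators[idx - 1]).  pyGet? … |>.getD is exact here: idx - 1 ∈ [-1, n-2]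
-- is always a valid Python index for the admitted (nonempty) inputs.
def pvGoA (L : List (String × Int × String × String)) (idx : Int)
    (rem : List (String × Int × String × String)) (r w : List String) (pat : String) (c : Int) :
    List String × List String × String :=
  match rem with
  | [] => (r, w, pat)
  | (_, dimensionality, _, it) :: rest =>
    if c = 0 then
      if ((PySem.List.pyGet? L (idx - 1)).getD ("", 0, "", "")).2.2.1 = "l" then
        pvGoA L (idx + 1) rest r (w ++ [pat]) it ((c + dimensionality) - 1)
      else
        pvGoA L (idx + 1) rest (r ++ [pat]) w it ((c + dimensionality) - 1)
    else pvGoA L (idx + 1) rest r w (pat ++ it) (c - 1)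

-- the final flush after the loop (appends current_pattern by list_of_iterators[-1][2])
def pvFinishA (st : List String × List String × String) (side : String) : List String × List String :=
  if side = "l" then (st.1, st.2.1 ++ [st.2.2]) else (st.1 ++ [st.2.2], st.2.1)

def reconstruct_arrays (list_of_iterators : List (String × Int × String × String)) : List String × List String :=
  match list_of_iterators with
  | [] => ([], [])  -- Python raises IndexError on list_of_iterators[0]; excluded by Pre_
  | x :: _ =>
    pvFinishA (pvGoA list_of_iterators 0 list_of_iterators [] [] "" x.2.1)
      (((PySem.List.pyGet? list_of_iterators (-1)).getD ("", 0, "", "")).2.2.1)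

-- ===== PORT B =====
-- Source B pass 1: the counter loop collecting only the group start indices; state (starts, counter)
def pvStartsB (idx : Int) (rem : List (String × Int × String × String)) (counter : Int)
    (starts : List Int) : List Int :=
  match rem with
  | [] => starts
  | (_, dimensionality, _, _) :: tl =>
    if counter = 0 then pvStartsB (idx + 1) tl (dimensionality - 1) (starts ++ [idx])
    else pvStartsB (idx + 1) tl (counter - 1) starts

-- Source B pass 2: for end in starts + [len(L)]: slice the group L[begin:end], skip it if empty,
-- otherwise join its it-fields and classify by group[-1][2]; `bg` is the begin pointer
def pvGroupsB (L : List (String × Int × String × String)) (bounds : List Int) (bg : Int)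
    (r w : List String) : List String × List String :=
  match bounds with
  | [] => (r, w)
  | e :: tl =>
    let group := PySem.List.slice L (some bg) (some e)
    if group ≠ [] then
      if ((PySem.List.pyGet? group (-1)).getD ("", 0, "", "")).2.2.1 = "l" then
        pvGroupsB L tl e r (w ++ [PySem.Str.join "" (group.map (·.2.2.2))])
      else pvGroupsB L tl e (r ++ [PySem.Str.join "" (group.map (·.2.2.2))]) w
    else pvGroupsB L tl e r w

def reconstruct_arrays_alt (list_of_iterators : List (String × Int × String × String)) : List String × List String :=
  match list_of_iterators with
  | [] => ([], [])  -- Python raises IndexError on list_of_iterators[0]; excluded by Pre_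
  | x :: _ =>
    pvGroupsB list_of_iterators
      (pvStartsB 0 list_of_iterators x.2.1 [] ++ [(list_of_iterators.length : Int)])
      0 [] []

-- ===== PRECONDITION & SPEC =====
-- Pre_ excludes only the empty list, on which the Python A raises IndexError.
def Pre_reconstruct_arrays (list_of_iterators : List (String × Int × String × String)) : Prop :=
  list_of_iterators ≠ []
instance (list_of_iterators : List (String × Int × String × String)) : Decidable (Pre_reconstruct_arrays list_of_iterators) := by unfold Pre_reconstruct_arrays; infer_instance

def pvWitness_reconstruct_arrays : (List (String × Int × String × String)) := [("a", 2, "l", "i0"), ("b", 1, "r", "i1")]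

-- On nonempty inputs whose first element has dimensionality 0, A flushes at index 0 and returns
-- an extra spurious empty pattern '' classified by the LAST element's side (an accidental
-- idx-1 == -1 negative-index wrap); B emits no empty group there, the intended grouping.
def D_reconstruct_arrays (list_of_iterators : List (String × Int × String × String)) : Prop :=
  (list_of_iterators.map (·.2.1)).head? = some 0
instance (list_of_iterators : List (String × Int × String × String)) : Decidable (D_reconstruct_arrays list_of_iterators) := by unfold D_reconstruct_arrays; infer_instance

def Spec_reconstruct_arrays (list_of_iterators : List (String × Int × String × String)) (out : List String × List String) : Prop := ¬ D_reconstruct_arrays list_of_iterators → out = reconstruct_arrays_alt list_of_iterators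
instance (list_of_iterators : List (String × Int × String × String)) (out : List String × List String) : Decidable (Spec_reconstruct_arrays list_of_iterators out) := by unfold Spec_reconstruct_arrays; infer_instance

def pvDiffWitness_reconstruct_arrays : (List (String × Int × String × String)) := [("a", 0, "r", "i")]
def pvDiffWitnessOut_reconstruct_arrays : (List String × List String) × (List String × List String) := ((["", "i"], []), (["i"], []))

-- ===== CLAIM (what is proved, stated in full; the proofs are below) =====
def Claim_unchanged_reconstruct_arrays : Prop := ∀ (list_of_iterators : List (String × Int × String × String)), Dom_reconstruct_arrays list_of_iterators → Pre_reconstruct_arrays list_of_iterators → Spec_reconstruct_arrays list_of_iterators (reconstruct_arrays list_of_iterators)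
def Claim_changed_reconstruct_arrays : Prop := Dom_reconstruct_arrays (pvDiffWitness_reconstruct_arrays) ∧ Pre_reconstruct_arrays (pvDiffWitness_reconstruct_arrays) ∧ D_reconstruct_arrays (pvDiffWitness_reconstruct_arrays) ∧ reconstruct_arrays (pvDiffWitness_reconstruct_arrays) = pvDiffWitnessOut_reconstruct_arrays.1 ∧ reconstruct_arrays_alt (pvDiffWitness_reconstruct_arrays) = pvDiffWitnessOut_reconstruct_arrays.2 ∧ pvDiffWitnessOut_reconstruct_arrays.1 ≠ pvDiffWitnessOut_reconstruct_arrays.2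
def Claim_exact_reconstruct_arrays : Prop := ∀ (list_of_iterators : List (String × Int × String × String)), Dom_reconstruct_arrays list_of_iterators → Pre_reconstruct_arrays list_of_iterators → D_reconstruct_arrays list_of_iterators → reconstruct_arrays list_of_iterators ≠ reconstruct_arrays_alt list_of_iterators

-- ===== LEMMAS AND PROOFS =====

-- the pattern of a group, as B computes it
def pvPat (l : List (String × Int × String × String)) : String :=
  PySem.Str.join "" (l.map (·.2.2.2))

lemma pvPat_nil : pvPat [] = "" := rfl

lemma pvPat_def (l : List (String × Int × String × String)) :
    PySem.Str.join "" (l.map (·.2.2.2)) = pvPat l := rfl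

lemma pvJoin_cons (a : String) (l : List String) :
    PySem.Str.join "" (a :: l) = a ++ PySem.Str.join "" l := by
  simp [PySem.Str.join, PySem.Chars.join, List.intercalate]
  cases l <;> simp

lemma pvPat_cons (x : String × Int × String × String) (l : List (String × Int × String × String)) :
    pvPat (x :: l) = x.2.2.2 ++ pvPat l := by
  simp [pvPat, pvJoin_cons]

lemma pvPat_single (x : String × Int × String × String) : pvPat [x] = x.2.2.2 := by
  rw [pvPat_cons, pvPat_nil, String.append_empty]

lemma pvPat_append_single (l : List (String × Int × String × String))
    (x : String × Int × String × String) : pvPat (l ++ [x]) = pvPat l ++ x.2.2.2 := by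
  induction l with
  | nil => simp [pvPat_nil, pvPat_single, String.empty_append]
  | cons y ys ih => rw [List.cons_append, pvPat_cons, ih, pvPat_cons, String.append_assoc]

-- the element just before a suffix, read through Python indexing
lemma pvPyGet_pre_last (pre : List (String × Int × String × String)) (hp : pre ≠ [])
    (rem : List (String × Int × String × String)) :
    PySem.List.pyGet? (pre ++ rem) ((pre.length : Int) - 1) = some (pre.getLast hp) := by
  obtain ⟨p', z, rfl⟩ := (List.eq_nil_or_concat pre).resolve_left hp
  simp only [List.concat_eq_append] at *
  have h1 : (((p' ++ [z]).length : Int) - 1) = ((p'.length : Nat) : Int) := by simp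
  rw [h1, List.append_assoc]
  simp

-- the slice L[bg:|pre|] of L = pre ++ rest is the tail of pre from bg
lemma pvSliceMid (pre rest : List (String × Int × String × String)) (bg : Nat)
    (h : bg ≤ pre.length) :
    PySem.List.slice (pre ++ rest) (some (bg : Int)) (some (pre.length : Int)) = pre.drop bg := by
  rw [PySem.List.slice_natCast, List.drop_append_of_le_length h,
    List.take_left' (by simp [List.length_drop])]

-- A's loop, run with a counter that never returns to 0: no flush, the whole tail is appended
lemma pvGoA_noflush (rem : List (String × Int × String × String)) :
    ∀ (L : List (String × Int × String × String)) (idx : Int) (r w : List String) (pat : String) (c : Int),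
    (c < 0 ∨ (rem.length : Int) ≤ c) →
    pvGoA L idx rem r w pat c = (r, w, rem.foldl (fun s x => s ++ x.2.2.2) pat) := by
  induction rem with
  | nil => intro L idx r w pat c _; rfl
  | cons y ys ih =>
    intro L idx r w pat c hc
    obtain ⟨_, dimy, _, ity⟩ := y
    have hc0 : ¬ (c = 0) := by simp only [List.length_cons] at hc; omega
    simp only [pvGoA, if_neg hc0, List.foldl]
    exact ih L (idx + 1) r w (pat ++ ity) (c - 1) (by simp only [List.length_cons] at hc ⊢; omega)

-- B's pass 1, with a negative counter: no further starts
lemma pvStartsB_nostart (rem : List (String × Int × String × String)) :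
    ∀ (idx c : Int) (acc : List Int), c < 0 → pvStartsB idx rem c acc = acc := by
  induction rem with
  | nil => intro idx c acc _; rfl
  | cons y ys ih =>
    intro idx c acc hc
    obtain ⟨_, d, _, _⟩ := y
    simp only [pvStartsB, if_neg (by omega : ¬ (c = 0))]
    exact ih (idx + 1) (c - 1) acc (by omega)

-- B's pass 1 accumulator law
lemma pvStartsB_acc (rem : List (String × Int × String × String)) :
    ∀ (idx c : Int) (acc : List Int), pvStartsB idx rem c acc = acc ++ pvStartsB idx rem c [] := by
  induction rem with
  | nil => intro idx c acc; simp [pvStartsB]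
  | cons y ys ih =>
    intro idx c acc
    obtain ⟨_, d, _, _⟩ := y
    by_cases hc : c = 0
    · simp only [pvStartsB, if_pos hc, List.nil_append]
      rw [ih (idx + 1) (d - 1) (acc ++ [idx]), ih (idx + 1) (d - 1) [idx], List.append_assoc]
    · simp only [pvStartsB, if_neg hc]
      exact ih (idx + 1) (c - 1) acc

-- main correspondence between A's loop (plus its final flush) and B's two passes; the invariant:
-- bg is the start of the group A is currently accumulating, pre the consumed prefix, and A's
-- pending pattern is the join of L[bg:|pre|]
lemma pvLoopCorr (rem : List (String × Int × String × String)) :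
    ∀ (pre : List (String × Int × String × String)) (r w : List String) (bg : Nat) (c : Int),
    bg ≤ pre.length → (c = 0 → bg < pre.length) → (rem = [] → bg < pre.length) →
    pvFinishA (pvGoA (pre ++ rem) (pre.length : Int) rem r w (pvPat (pre.drop bg)) c)
        (((PySem.List.pyGet? (pre ++ rem) (-1)).getD ("", 0, "", "")).2.2.1)
      = pvGroupsB (pre ++ rem) (pvStartsB (pre.length : Int) rem c [] ++ [((pre ++ rem).length : Int)])
          (bg : Int) r w := by
  induction rem with
  | nil =>
    intro pre r w bg c hle _ hne
    have hbg : bg < pre.length := hne rfl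
    have hpre : pre ≠ [] := by intro h; rw [h] at hbg; simp at hbg
    have hdropne : pre.drop bg ≠ [] := by
      intro h
      have := congrArg List.length h
      simp only [List.length_drop, List.length_nil] at this
      omega
    simp only [List.append_nil, pvStartsB, List.nil_append, pvGoA]
    rw [pvGroupsB]
    have hslice : PySem.List.slice pre (some (bg : Int)) (some (pre.length : Int)) = pre.drop bg := by
      have := pvSliceMid pre [] bg hle
      rwa [List.append_nil] at this
    simp only [hslice, if_pos hdropne, PySem.List.pyGet?_neg_one,
      List.getLast?_eq_some_getLast hdropne, Option.getD_some, List.getLast_drop,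
      List.getLast?_eq_some_getLast hpre]
    rw [pvFinishA]
    split_ifs with h <;> simp [pvGroupsB, pvPat]
  | cons x tl ih =>
    intro pre r w bg c hle hc0 _
    obtain ⟨a, d, s, i⟩ := x
    by_cases hc : c = 0
    · -- flush step: A emits the pending pattern, B has recorded this index as a group start
      have hbg : bg < pre.length := hc0 hc
      have hpre : pre ≠ [] := by intro h; rw [h] at hbg; simp at hbg
      have hdropne : pre.drop bg ≠ [] := by
        intro h
        have := congrArg List.length h
        simp only [List.length_drop, List.length_nil] at this
        omega
      have hget := pvPyGet_pre_last pre hpre ((a, d, s, i) :: tl)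
      have hL : pre ++ (a, d, s, i) :: tl = (pre ++ [(a, d, s, i)]) ++ tl := by
        simp [List.append_assoc]
      have hlen' : ((pre ++ [(a, d, s, i)]).length : Int) = (pre.length : Int) + 1 := by
        simp
      subst hc
      have hcnt : ((0 : Int) + d) - 1 = d - 1 := by omega
      -- B side: pass 1 starts with this index, pass 2 therefore emits the same group first
      rw [pvGoA, if_pos rfl, hget, Option.getD_some, hcnt,
        pvStartsB, if_pos rfl, pvStartsB_acc, List.nil_append, List.append_assoc,
        List.cons_append, pvGroupsB]
      have hslice := pvSliceMid pre ((a, d, s, i) :: tl) bg hle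
      have hglast : (PySem.List.pyGet? (pre.drop bg) (-1)).getD ("", 0, "", "")
          = pre.getLast hpre := by
        rw [PySem.List.pyGet?_neg_one, List.getLast?_eq_some_getLast hdropne, Option.getD_some,
          List.getLast_drop]
      simp only [hslice, if_pos hdropne, hglast, pvPat_def, List.nil_append]
      -- the recursive call: new prefix pre ++ [x], new group start |pre|
      have hdrop : (pre ++ [(a, d, s, i)]).drop pre.length = [(a, d, s, i)] := List.drop_left' rfl
      have hpat1 : pvPat [(a, d, s, i)] = i := pvPat_single _
      have hih := fun (r' w' : List String) =>
        ih (pre ++ [(a, d, s, i)]) r' w' pre.length (d - 1) (by simp) (by simp) (by simp)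
      simp only [hdrop, hpat1, ← hL, hlen'] at hih
      split_ifs with hside
      · exact hih r (w ++ [pvPat (pre.drop bg)])
      · exact hih (r ++ [pvPat (pre.drop bg)]) w
    · -- ordinary step: A extends the pending pattern, B records nothing
      have hL : pre ++ (a, d, s, i) :: tl = (pre ++ [(a, d, s, i)]) ++ tl := by
        simp [List.append_assoc]
      have hlen' : ((pre ++ [(a, d, s, i)]).length : Int) = (pre.length : Int) + 1 := by simp
      rw [pvGoA, if_neg hc, pvStartsB, if_neg hc]
      have hpat : pvPat (pre.drop bg) ++ i = pvPat ((pre ++ [(a, d, s, i)]).drop bg) := by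
        rw [List.drop_append_of_le_length hle, pvPat_append_single]
      have hih := ih (pre ++ [(a, d, s, i)]) r w bg (c - 1)
        (by simp; omega) (by simp; omega) (by simp; omega)
      rw [← hL, hlen'] at hih
      rw [hpat]
      exact hih

-- ===== VERDICT (by name: the statements are the Claim_ definitions above) =====
theorem reconstruct_arrays_spec : Claim_unchanged_reconstruct_arrays := by
  intro L _ hpre
  unfold Spec_reconstruct_arrays
  intro hnd
  cases L with
  | nil => exact absurd rfl hpre
  | cons x xs =>
  have hx : ¬ (x.2.1 = 0) := by
    simpa [D_reconstruct_arrays] using hnd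
  simp only [reconstruct_arrays, reconstruct_arrays_alt]
  have h := pvLoopCorr (x :: xs) [] [] [] 0 x.2.1 (Nat.le_refl 0)
    (fun h0 => absurd h0 hx) (by simp)
  simpa [pvPat_nil] using h

theorem reconstruct_arrays_changed : Claim_changed_reconstruct_arrays := by
  unfold Claim_changed_reconstruct_arrays; decide

theorem reconstruct_arrays_tight : Claim_exact_reconstruct_arrays := by
  intro L _ hpre hd
  cases L with
  | nil => exact absurd rfl hpre
  | cons x xs =>
  obtain ⟨a, d, s, i⟩ := x
  have hd0 : d = 0 := by simpa [D_reconstruct_arrays] using hd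
  subst hd0
  simp only [reconstruct_arrays, reconstruct_arrays_alt]
  have hlast : PySem.List.pyGet? ((a, 0, s, i) :: xs) (-1) =
      some (((a, 0, s, i) :: xs).getLast (by simp)) := by
    rw [PySem.List.pyGet?_neg_one, List.getLast?_eq_some_getLast]
  have hslice0 : PySem.List.slice ((a, 0, s, i) :: xs) (some (0 : Int)) (some (0 : Int)) = [] := by
    have h00 : ((0 : Nat) : Int) = (0 : Int) := rfl
    rw [← h00, PySem.List.slice_natCast]
    simp
  have hsliceAll : PySem.List.slice ((a, 0, s, i) :: xs) (some (0 : Int))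
      (some ((((a, 0, s, i) :: xs).length : Nat) : Int)) = (a, 0, s, i) :: xs := by
    have h00 : ((0 : Nat) : Int) = (0 : Int) := rfl
    rw [← h00, PySem.List.slice_natCast]
    simp
  -- A: one flush at index 0 (side = last element's, by the -1 wrap), then no further flush
  have hA : pvGoA ((a, 0, s, i) :: xs) 0 ((a, 0, s, i) :: xs) [] [] "" 0
      = (if (((a, 0, s, i) :: xs).getLast (by simp)).2.2.1 = "l"
          then ([], [""], xs.foldl (fun s x => s ++ x.2.2.2) i)
          else ([""], [], xs.foldl (fun s x => s ++ x.2.2.2) i)) := by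
    rw [pvGoA, if_pos rfl]
    have hzm : ((0 : Int) - 1) = (-1 : Int) := by omega
    rw [hzm, hlast, Option.getD_some]
    split_ifs with h
    · rw [pvGoA_noflush xs _ _ _ _ _ _ (by omega)]; simp
    · rw [pvGoA_noflush xs _ _ _ _ _ _ (by omega)]; simp
  -- B: one start at index 0, then none; its first group L[0:0] is empty and skipped
  have hB : pvGroupsB ((a, 0, s, i) :: xs)
        (pvStartsB 0 ((a, 0, s, i) :: xs) 0 [] ++ [(((a, 0, s, i) :: xs).length : Int)]) 0 [] []
      = (if (((a, 0, s, i) :: xs).getLast (by simp)).2.2.1 = "l"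
          then ([], [PySem.Str.join "" (((a, 0, s, i) :: xs).map (·.2.2.2))])
          else ([PySem.Str.join "" (((a, 0, s, i) :: xs).map (·.2.2.2))], [])) := by
    rw [pvStartsB, if_pos rfl, pvStartsB_acc, pvStartsB_nostart xs _ _ _ (by omega)]
    simp only [List.append_nil, List.nil_append, List.singleton_append]
    rw [pvGroupsB]
    simp only [hslice0, ne_eq, not_true_eq_false, if_false]
    rw [pvGroupsB]
    simp only [hsliceAll, hlast, Option.getD_some, ne_eq, reduceCtorEq, not_false_eq_true, if_true]
    split_ifs with h
    · rw [pvGroupsB]; simp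
    · rw [pvGroupsB]; simp
  rw [hA, hB, hlast, Option.getD_some]
  -- A's result has one extra (empty) pattern in the classified component
  split_ifs with hside <;> intro hcon
  · have := congrArg (fun p => p.2.length) hcon
    simp [pvFinishA, hside] at this
  · have := congrArg (fun p => p.1.length) hcon
    simp [pvFinishA, hside] at this
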